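-- pv_equiv track=rewrite | github.com/mattwheeler/contextflow | contextflow/core/workflow_manager.py | _has_action_words
-- ===== SOURCE A (Python) =====
-- def _has_action_words(text: str) -> bool:
--     """Check if text contains action words"""
--     action_words = [
--         "implemented",
--         "added",
--         "created",
--         "built",
--         "developed",
--         "fixed",
--         "resolved",
--         "corrected",
--         "repaired",
--         "updated",
--         "modified",
--         "changed",
--         "improved",
--         "refactored",
--         "optimized",
--         "enhanced",
--         "tested",
--         "validated",
--         "verified",
--         "documented",
--         "wrote",
--         "drafted",
--     ]
--
--     text_lower = text.lower()
--     return any(word in text_lower for word in action_words)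
-- ===== SOURCE B (Python) =====
-- _WORD_TAILS = {
--     "i": ("mplemented", "mproved"),
--     "a": ("dded",),
--     "c": ("reated", "orrected", "hanged"),
--     "b": ("uilt",),
--     "d": ("eveloped", "ocumented", "rafted"),
--     "f": ("ixed",),
--     "r": ("esolved", "epaired", "efactored"),
--     "u": ("pdated",),
--     "m": ("odified",),
--     "o": ("ptimized",),
--     "e": ("nhanced",),
--     "t": ("ested",),
--     "v": ("alidated", "erified"),
--     "w": ("rote",),
-- }
--
--
-- def _has_action_words(text: str) -> bool:
--     """Single pass over the lowered text, dispatching at each position on the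
--     current character via a first-letter index of the action words, then
--     matching only the corresponding word tails there."""
--     t = text.lower()
--     for i, c in enumerate(t):
--         for tail in _WORD_TAILS.get(c, ()):
--             if t.startswith(tail, i + 1):
--                 return True
--     return False
-- ===== Notes on version B (the rewrite author's own statement) =====
-- stated objective: alternative
-- what changed: Replaces A's 22 independent full substring searches over the lowered text by a single left-to-right pass that at each position dispatches on the current character through a precomputed first-letter dict of word tails and matches only those tails there.
import Mathlib
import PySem

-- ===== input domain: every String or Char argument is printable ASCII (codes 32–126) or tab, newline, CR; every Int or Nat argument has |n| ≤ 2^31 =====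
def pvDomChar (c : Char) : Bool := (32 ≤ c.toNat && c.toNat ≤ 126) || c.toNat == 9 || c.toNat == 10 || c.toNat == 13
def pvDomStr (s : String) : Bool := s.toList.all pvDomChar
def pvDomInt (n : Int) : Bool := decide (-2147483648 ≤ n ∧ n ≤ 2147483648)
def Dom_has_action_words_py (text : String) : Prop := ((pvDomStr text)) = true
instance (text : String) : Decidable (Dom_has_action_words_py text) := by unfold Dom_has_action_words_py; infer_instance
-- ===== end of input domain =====

-- B replaces A's 22 independent substring searches by one pass over the lowered text that
-- dispatches at each position on the current character via a first-letter index of word tails.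


-- ===== PORT A =====
-- A's local list of action words
def pvActionWordsA : List String :=
  ["implemented", "added", "created", "built", "developed", "fixed",
   "resolved", "corrected", "repaired", "updated", "modified", "changed",
   "improved", "refactored", "optimized", "enhanced", "tested", "validated",
   "verified", "documented", "wrote", "drafted"]

def has_action_words_py (text : String) : Bool :=
  let text_lower := PySem.Str.lower text
  pvActionWordsA.any (fun word => PySem.Str.isIn word text_lower)

-- ===== PORT B =====
-- B's module-level first-letter index: first character ↦ tails of the action words
-- beginning with it (the Python dict literal _WORD_TAILS)
def pvWordTails : PySem.Dict Char (List String) :=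
  PySem.Dict.ofList
    [('i', ["mplemented", "mproved"]),
     ('a', ["dded"]),
     ('c', ["reated", "orrected", "hanged"]),
     ('b', ["uilt"]),
     ('d', ["eveloped", "ocumented", "rafted"]),
     ('f', ["ixed"]),
     ('r', ["esolved", "epaired", "efactored"]),
     ('u', ["pdated"]),
     ('m', ["odified"]),
     ('o', ["ptimized"]),
     ('e', ["nhanced"]),
     ('t', ["ested"]),
     ('v', ["alidated", "erified"]),
     ('w', ["rote"])]

-- 'for i, c in enumerate(t): for tail in _WORD_TAILS.get(c, ()): if t.startswith(tail, i+1)'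
-- as structural recursion over the suffixes of t (t.startswith(tail, i+1) = tail prefix of t[i+1:])
def pvDispatchScan : List Char → Bool
  | [] => false
  | c :: cs =>
      (pvWordTails.getD c []).any (fun tl => PySem.Chars.startswith cs tl.toList)
        || pvDispatchScan cs

def has_action_words_py_alt (text : String) : Bool :=
  pvDispatchScan (PySem.Str.lower text).toList

-- ===== PRECONDITION & SPEC =====
def Spec_has_action_words_py (text : String) (out : Bool) : Prop := out = has_action_words_py_alt text
instance (text : String) (out : Bool) : Decidable (Spec_has_action_words_py text out) := by unfold Spec_has_action_words_py; infer_instance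

-- ===== CLAIM (what is proved, stated in full; the proofs are below) =====
def Claim_equal_has_action_words_py : Prop := ∀ (text : String), Dom_has_action_words_py text → Spec_has_action_words_py text (has_action_words_py text)

-- ===== LEMMAS AND PROOFS =====
-- At a single position, dispatching on the first character through the index tests
-- exactly "some action word starts here".
lemma pvDispatch_eq (c : Char) (cs : List Char) :
    (pvWordTails.getD c []).any (fun tl => PySem.Chars.startswith cs tl.toList)
    = pvActionWordsA.any (fun w => PySem.Chars.startswith (c :: cs) w.toList) := by
  have hmk : pvWordTails = PySem.Dict.mk
    [('i', ["mplemented", "mproved"]),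
     ('a', ["dded"]),
     ('c', ["reated", "orrected", "hanged"]),
     ('b', ["uilt"]),
     ('d', ["eveloped", "ocumented", "rafted"]),
     ('f', ["ixed"]),
     ('r', ["esolved", "epaired", "efactored"]),
     ('u', ["pdated"]),
     ('m', ["odified"]),
     ('o', ["ptimized"]),
     ('e', ["nhanced"]),
     ('t', ["ested"]),
     ('v', ["alidated", "erified"]),
     ('w', ["rote"])] := rfl
  by_cases h1 : 'i' = c
  · subst h1; simp [hmk, PySem.Chars.startswith, List.isPrefixOf, pvActionWordsA, PySem.Dict.getD, PySem.Dict.get?]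
  by_cases h2 : 'a' = c
  · subst h2; simp [hmk, PySem.Chars.startswith, List.isPrefixOf, pvActionWordsA, PySem.Dict.getD, PySem.Dict.get?]
  by_cases h3 : 'c' = c
  · subst h3; simp [hmk, PySem.Chars.startswith, List.isPrefixOf, pvActionWordsA, PySem.Dict.getD, PySem.Dict.get?]
  by_cases h4 : 'b' = c
  · subst h4; simp [hmk, PySem.Chars.startswith, List.isPrefixOf, pvActionWordsA, PySem.Dict.getD, PySem.Dict.get?]
  by_cases h5 : 'd' = c
  · subst h5; simp [hmk, PySem.Chars.startswith, List.isPrefixOf, pvActionWordsA, PySem.Dict.getD, PySem.Dict.get?]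
  by_cases h6 : 'f' = c
  · subst h6; simp [hmk, PySem.Chars.startswith, List.isPrefixOf, pvActionWordsA, PySem.Dict.getD, PySem.Dict.get?]
  by_cases h7 : 'r' = c
  · subst h7; simp [hmk, PySem.Chars.startswith, List.isPrefixOf, pvActionWordsA, PySem.Dict.getD, PySem.Dict.get?]
  by_cases h8 : 'u' = c
  · subst h8; simp [hmk, PySem.Chars.startswith, List.isPrefixOf, pvActionWordsA, PySem.Dict.getD, PySem.Dict.get?]
  by_cases h9 : 'm' = c
  · subst h9; simp [hmk, PySem.Chars.startswith, List.isPrefixOf, pvActionWordsA, PySem.Dict.getD, PySem.Dict.get?]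
  by_cases h10 : 'o' = c
  · subst h10; simp [hmk, PySem.Chars.startswith, List.isPrefixOf, pvActionWordsA, PySem.Dict.getD, PySem.Dict.get?]
  by_cases h11 : 'e' = c
  · subst h11; simp [hmk, PySem.Chars.startswith, List.isPrefixOf, pvActionWordsA, PySem.Dict.getD, PySem.Dict.get?]
  by_cases h12 : 't' = c
  · subst h12; simp [hmk, PySem.Chars.startswith, List.isPrefixOf, pvActionWordsA, PySem.Dict.getD, PySem.Dict.get?]
  by_cases h13 : 'v' = c
  · subst h13; simp [hmk, PySem.Chars.startswith, List.isPrefixOf, pvActionWordsA, PySem.Dict.getD, PySem.Dict.get?]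
  by_cases h14 : 'w' = c
  · subst h14; simp [hmk, PySem.Chars.startswith, List.isPrefixOf, pvActionWordsA, PySem.Dict.getD, PySem.Dict.get?]
  simp [hmk, pvActionWordsA, PySem.Chars.startswith, List.isPrefixOf, PySem.Dict.getD, PySem.Dict.get?, PySem.Dict.get?_mk_cons, h1, h2, h3, h4, h5, h6, h7, h8, h9, h10, h11, h12, h13, h14]

-- The position-major dispatch scan tests "some action word is an infix".
lemma pvDispatchScan_eq_any_isIn (cs : List Char) :
    pvDispatchScan cs = pvActionWordsA.any (fun w => PySem.Chars.isIn w.toList cs) := by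
  induction cs with
  | nil => decide
  | cons c cs ih =>
      rw [pvDispatchScan, ih, pvDispatch_eq, Bool.eq_iff_iff]
      simp only [Bool.or_eq_true, List.any_eq_true,
        PySem.Chars.startswith_iff, PySem.Chars.isIn_iff_infix, List.infix_cons_iff]
      constructor
      · rintro (⟨w, hw, h⟩ | ⟨w, hw, h⟩)
        · exact ⟨w, hw, Or.inl h⟩
        · exact ⟨w, hw, Or.inr h⟩
      · rintro ⟨w, hw, h | h⟩
        · exact Or.inl ⟨w, hw, h⟩
        · exact Or.inr ⟨w, hw, h⟩

-- ===== VERDICT (by name: the statement is the Claim_ definition above) =====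
theorem has_action_words_py_spec : Claim_equal_has_action_words_py := by
  intro text _
  unfold Spec_has_action_words_py has_action_words_py has_action_words_py_alt
  rw [pvDispatchScan_eq_any_isIn]
  simp [PySem.Str.isIn_eq]
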